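-- pv_equiv track=rewrite | github.com/Thomas-Lemoine/maze-visualization-tool | function.py | fix_globals
-- ===== SOURCE A (Python) =====
-- def fix_globals(width, height, rows, cols):
--     if rows % 4 != 1:
--         for i in range(4):
--             rows += 1
--             if rows % 4 == 1:
--                 break
--
--     if cols % 4 != 1:
--         for i in range(4):
--             cols += 1
--             if cols % 4 == 1:
--                 break
--
--     gapx = width // cols
--     gapy = height // rows
--
--     height = (gapy * rows)
--     width = (gapx * cols)
--
--     return width, height, rows, cols
-- ===== SOURCE B (Python) =====
-- def fix_globals(width, height, rows, cols):
--     rows += (1 - rows) % 4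
--     cols += (1 - cols) % 4
--     gapx = width // cols
--     gapy = height // rows
--     return gapx * cols, gapy * rows, rows, cols
-- ===== Notes on version B (the rewrite author's own statement) =====
-- stated objective: simpler
-- what changed: Replaces each bounded increment-until-residue loop with the closed-form step rows += (1 - rows) % 4 (and likewise for cols), so B performs no iteration at all.
import Mathlib
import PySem

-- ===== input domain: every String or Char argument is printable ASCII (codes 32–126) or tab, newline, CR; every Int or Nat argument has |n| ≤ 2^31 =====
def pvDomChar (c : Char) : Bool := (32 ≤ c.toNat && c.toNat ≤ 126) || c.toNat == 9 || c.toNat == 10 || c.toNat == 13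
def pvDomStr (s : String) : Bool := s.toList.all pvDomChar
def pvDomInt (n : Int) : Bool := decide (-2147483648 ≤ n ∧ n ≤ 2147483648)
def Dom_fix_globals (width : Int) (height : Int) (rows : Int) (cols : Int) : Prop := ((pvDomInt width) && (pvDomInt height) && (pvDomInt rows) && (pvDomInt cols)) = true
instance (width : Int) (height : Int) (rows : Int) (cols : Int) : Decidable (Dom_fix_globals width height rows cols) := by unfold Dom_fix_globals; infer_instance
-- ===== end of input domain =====

-- B replaces A's two bounded increment-until-residue loops with the closed-form step r += (1 - r) % 4 (objective: simpler).

-- ===== PORT A =====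
-- the 'for i in range(4): r += 1; if r % 4 == 1: break' loop, with an explicit break flag
def fixLoopA (r : Int) : Int :=
  ((PySem.List.pyRange 0 4 1).foldl
    (fun (st : Int × Bool) _ =>
      if st.2 then st
      else
        let r' := st.1 + 1
        if PySem.Int.mod r' 4 == 1 then (r', true) else (r', false))
    (r, false)).1

def fix_globals (width : Int) (height : Int) (rows : Int) (cols : Int) : Int × Int × Int × Int :=
  let rows := if PySem.Int.mod rows 4 ≠ 1 then fixLoopA rows else rows
  let cols := if PySem.Int.mod cols 4 ≠ 1 then fixLoopA cols else cols
  let gapx := PySem.Int.floordiv width cols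
  let gapy := PySem.Int.floordiv height rows
  (gapx * cols, gapy * rows, rows, cols)

-- ===== PORT B =====
def fix_globals_alt (width : Int) (height : Int) (rows : Int) (cols : Int) : Int × Int × Int × Int :=
  let rows := rows + PySem.Int.mod (1 - rows) 4
  let cols := cols + PySem.Int.mod (1 - cols) 4
  let gapx := PySem.Int.floordiv width cols
  let gapy := PySem.Int.floordiv height rows
  (gapx * cols, gapy * rows, rows, cols)

-- ===== PRECONDITION & SPEC =====
def Spec_fix_globals (width : Int) (height : Int) (rows : Int) (cols : Int) (out : Int × Int × Int × Int) : Prop := out = fix_globals_alt width height rows cols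
instance (width : Int) (height : Int) (rows : Int) (cols : Int) (out : Int × Int × Int × Int) : Decidable (Spec_fix_globals width height rows cols out) := by unfold Spec_fix_globals; infer_instance

-- ===== CLAIM (what is proved, stated in full; the proofs are below) =====
def Claim_equal_fix_globals : Prop := ∀ (width : Int) (height : Int) (rows : Int) (cols : Int), Dom_fix_globals width height rows cols → Spec_fix_globals width height rows cols (fix_globals width height rows cols)

-- ===== LEMMAS AND PROOFS =====
-- A's rounding (loop guarded by the residue test) equals B's closed form
theorem fixA_eq_closed (r : Int) :
    (if PySem.Int.mod r 4 ≠ 1 then fixLoopA r else r) = r + PySem.Int.mod (1 - r) 4 := by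
  have hm : ∀ a : Int, PySem.Int.mod a 4 = a % 4 := fun a => PySem.Int.mod_eq_emod_of_pos (by norm_num)
  have hr : PySem.List.pyRange 0 4 1 = [0, 1, 2, 3] := by
    rw [PySem.List.pyRange_one]; rfl
  simp only [fixLoopA, hm, hr, List.foldl, beq_iff_eq]
  have h : r % 4 = 0 ∨ r % 4 = 1 ∨ r % 4 = 2 ∨ r % 4 = 3 := by omega
  rcases h with h | h | h | h
  · rw [if_pos (by omega)]
    simp only [if_neg (by simp : ¬(false = true)), if_pos (show (r + 1) % 4 = 1 by omega)]
    simp; omega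
  · rw [if_neg (by omega)]
    omega
  · rw [if_pos (by omega)]
    simp only [if_neg (by simp : ¬(false = true)),
      if_neg (show ¬(r + 1) % 4 = 1 by omega),
      if_neg (show ¬(r + 1 + 1) % 4 = 1 by omega),
      if_pos (show (r + 1 + 1 + 1) % 4 = 1 by omega)]
    simp; omega
  · rw [if_pos (by omega)]
    simp only [if_neg (by simp : ¬(false = true)),
      if_neg (show ¬(r + 1) % 4 = 1 by omega),
      if_pos (show (r + 1 + 1) % 4 = 1 by omega)]
    simp; omega

-- ===== VERDICT (by name: the statement is the Claim_ definition above) =====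
theorem fix_globals_spec : Claim_equal_fix_globals := by
  intro width height rows cols _
  unfold Spec_fix_globals fix_globals fix_globals_alt
  rw [fixA_eq_closed rows, fixA_eq_closed cols]
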